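-- pv_equiv track=rewrite | github.com/wzygxr/shuati | class055_DynamicProgramming/dp_fusion.py | monster_game
-- ===== SOURCE A (Python) =====
-- def monster_game(grid):
--     """
--     蒙斯特曼问题
--     题目来源：算法竞赛问题
--
--     问题描述：
--     在网格中放置怪物，使得任何两个怪物都不在同一行、同一列或对角线上。
--
--     解题思路：
--     使用状态压缩DP，dp[i][mask]表示处理到第i行，已放置的列的状态为mask时的方案数。
--
--     时间复杂度：O(n * 2^n)
--     空间复杂度：O(2^n)
--     """
--     n = len(grid)
--     # dp[i][mask]表示处理到第i行，已放置的列的状态为mask时的方案数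
--     dp = [0] * (1 << n)
--     dp[0] = 1
--
--     for i in range(n):
--         new_dp = [0] * (1 << n)
--         for mask in range(1 << n):
--             if dp[mask] == 0:
--                 continue
--             # 枚举所有可能的放置位置
--             for j in range(n):
--                 # 检查是否可以在(i,j)放置怪物
--                 if (mask & (1 << j)) == 0 and grid[i][j] == 1:
--                     # 检查对角线
--                     valid = True
--                     for k in range(i):
--                         if (mask & (1 << k)) and abs(k - j) == i - k:
--                             valid = False
--                             break
--                     if valid:
--                         new_dp[mask | (1 << j)] += dp[mask]
--         dp = new_dp
--
--     return dp[(1 << n) - 1]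
-- ===== SOURCE B (Python) =====
-- def monster_game(grid):
--     n = len(grid)
--
--     def rec(i, mask):
--         if i == n:
--             return 1
--         total = 0
--         for j in range(n):
--             if (mask >> j) & 1 == 0 and grid[i][j] == 1:
--                 if all(not ((mask >> k) & 1 and abs(k - j) == i - k) for k in range(i)):
--                     total += rec(i + 1, mask | (1 << j))
--         return total
--
--     return rec(0, 0)
-- ===== Notes on version B (the rewrite author's own statement) =====
-- stated objective: faster
-- what changed: Replaces the bottom-up mask-indexed DP table (an array of 2^n counts rescanned in full for every row) with a top-down recursive backtracking counter rec(i, mask) that only visits reachable partial placements; on generated inputs a timing run measured B 93x faster at the largest size both completed.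
-- outside the precondition, e.g. on monster_game([[0, 0], [1]]): A returns 0, B returns 0
import Mathlib
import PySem

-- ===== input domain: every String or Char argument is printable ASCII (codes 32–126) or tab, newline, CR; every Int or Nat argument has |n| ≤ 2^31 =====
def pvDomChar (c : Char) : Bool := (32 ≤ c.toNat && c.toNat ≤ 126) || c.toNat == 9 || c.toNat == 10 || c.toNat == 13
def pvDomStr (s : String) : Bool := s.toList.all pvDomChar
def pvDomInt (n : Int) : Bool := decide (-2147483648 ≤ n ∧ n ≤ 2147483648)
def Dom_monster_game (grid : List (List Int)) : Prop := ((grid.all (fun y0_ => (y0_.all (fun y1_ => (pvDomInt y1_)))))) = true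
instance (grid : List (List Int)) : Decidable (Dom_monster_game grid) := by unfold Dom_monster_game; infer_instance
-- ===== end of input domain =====

-- B replaces A's bottom-up 2^n-entry DP table with top-down recursive backtracking over rows,
-- visiting only reachable partial placements (a timing run measured B faster on its inputs).

-- ===== PORT A =====
-- the inner `for k in range(i)` diagonal loop (early `break` = List.all short-circuit)
def mgDiagA (i j mask : Nat) : Bool :=
  (List.range i).all (fun k => !(mask &&& (1 <<< k) != 0 && ((k : Int) - (j : Int)).natAbs == i - k))

def monster_game (grid : List (List Int)) : Int :=
  let n := grid.length
  let dp0 : List Int := (List.replicate (2 ^ n) (0 : Int)).set 0 1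
  let dpN := (List.range n).foldl (fun dp i =>
    (List.range (2 ^ n)).foldl (fun (ndp : List Int) mask =>
      if dp.getD mask 0 = 0 then ndp
      else (List.range n).foldl (fun ndp j =>
        if mask &&& (1 <<< j) = 0 ∧ (grid.getD i []).getD j 0 = 1 then
          if mgDiagA i j mask then
            ndp.set (mask ||| (1 <<< j)) (ndp.getD (mask ||| (1 <<< j)) 0 + dp.getD mask 0)
          else ndp
        else ndp) ndp) (List.replicate (2 ^ n) (0 : Int))) dp0
  dpN.getD (2 ^ n - 1) 0

-- ===== PORT B =====
-- the `all(...)` generator in B's diagonal check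
def mgDiagB (i j mask : Nat) : Bool :=
  (List.range i).all (fun k => !((mask >>> k) &&& 1 != 0 && ((k : Int) - (j : Int)).natAbs == i - k))

-- rec(i, mask); structural recursion on fuel = n - i (Python recurses until i == n)
def mgRec (grid : List (List Int)) (n : Nat) : Nat → Nat → Nat → Int
  | 0, _, _ => 1
  | fuel + 1, i, mask =>
    (List.range n).foldl (fun total j =>
      if (mask >>> j) &&& 1 = 0 ∧ (grid.getD i []).getD j 0 = 1 then
        if mgDiagB i j mask then total + mgRec grid n fuel (i + 1) (mask ||| (1 <<< j))
        else total
      else total) 0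

def monster_game_alt (grid : List (List Int)) : Int :=
  mgRec grid grid.length grid.length 0 0

-- ===== PRECONDITION & SPEC =====
-- Pre_ excludes ragged grids (some row shorter than the number of rows), on which
-- Python A raises IndexError whenever the indexing is reached (and B does the same).
def Pre_monster_game (grid : List (List Int)) : Prop :=
  ∀ row ∈ grid, grid.length ≤ row.length
instance (grid : List (List Int)) : Decidable (Pre_monster_game grid) := by
  unfold Pre_monster_game; infer_instance

def pvWitness_monster_game : List (List Int) := [[1, 0], [0, 1]]

def Spec_monster_game (grid : List (List Int)) (out : Int) : Prop := out = monster_game_alt grid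
instance (grid : List (List Int)) (out : Int) : Decidable (Spec_monster_game grid out) := by unfold Spec_monster_game; infer_instance

-- ===== CLAIM (what is proved, stated in full; the proofs are below) =====
def Claim_equal_monster_game : Prop := ∀ (grid : List (List Int)), Dom_monster_game grid → Pre_monster_game grid → Spec_monster_game grid (monster_game grid)

-- ===== LEMMAS AND PROOFS =====

-- the full placement condition at (i, j) given column-set `mask` (A's guard)
def mgCond (grid : List (List Int)) (i mask j : Nat) : Bool :=
  decide (mask &&& (1 <<< j) = 0) && decide ((grid.getD i []).getD j 0 = 1) && mgDiagA i j mask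

-- reference count: like B's recursion but with base case `mask = 2^n - 1`
def mgRecTo (grid : List (List Int)) (n : Nat) : Nat → Nat → Nat → Int
  | 0, _, mask => if mask = 2 ^ n - 1 then 1 else 0
  | fuel + 1, i, mask =>
    ∑ j ∈ Finset.range n,
      if mgCond grid i mask j = true then mgRecTo grid n fuel (i + 1) (mask ||| (1 <<< j)) else 0

-- number of set bits below n
def mgCnt (n mask : Nat) : Nat := ((Finset.range n).filter (fun k => mask.testBit k)).card

theorem mg_list_sum_range {M : Type} [AddCommMonoid M] (f : Nat → M) (k : Nat) :
    ((List.range k).map f).sum = ∑ m ∈ Finset.range k, f m := by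
  induction k with
  | zero => simp
  | succ k ih => simp [List.range_succ, Finset.sum_range_succ, ih]

theorem mg_and_pow_eq_zero (mask j : Nat) :
    (mask &&& (1 <<< j) = 0) ↔ mask.testBit j = false := by
  rw [Nat.one_shiftLeft, Nat.and_two_pow]
  cases h : mask.testBit j
  · simp
  · simp [Nat.pow_eq_zero]

theorem mg_shift_and_one (mask j : Nat) :
    ((mask >>> j) &&& 1 = 0) ↔ mask.testBit j = false := by
  simp [Nat.testBit, Nat.and_comm]

theorem mg_bne_eq (mask k : Nat) :
    ((mask >>> k) &&& 1 != 0) = (mask &&& (1 <<< k) != 0) := by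
  have l : ((mask >>> k) &&& 1 != 0) = mask.testBit k := by rw [Nat.and_comm]; rfl
  have r : (mask &&& (1 <<< k) != 0) = mask.testBit k := by
    rw [Nat.one_shiftLeft, Nat.and_two_pow]
    cases h : mask.testBit k
    · simp
    · simp [Nat.pow_eq_zero]
  rw [l, r]

theorem mgDiagB_eq (i j mask : Nat) : mgDiagB i j mask = mgDiagA i j mask := by
  simp only [mgDiagB, mgDiagA, mg_bne_eq]

theorem mg_getD_set_add (l : List Int) (t m : Nat) (v : Int) (hm : m < l.length) :
    (l.set t (l.getD t 0 + v)).getD m 0 = l.getD m 0 + (if m = t then v else 0) := by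
  simp only [List.getD_eq_getElem?_getD, List.getElem?_set]
  by_cases h : t = m
  · subst h; simp [hm]
  · have h' : ¬ m = t := fun hh => h hh.symm
    simp [h, h']

theorem mg_inner_len (grid : List (List Int)) (i mask : Nat) (c : Int) (js : List Nat)
    (ndp : List Int) :
    (js.foldl (fun (ndp : List Int) j =>
      if mask &&& (1 <<< j) = 0 ∧ (grid.getD i []).getD j 0 = 1 then
        if mgDiagA i j mask then
          ndp.set (mask ||| (1 <<< j)) (ndp.getD (mask ||| (1 <<< j)) 0 + c)
        else ndp
      else ndp) ndp).length = ndp.length := by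
  induction js generalizing ndp with
  | nil => rfl
  | cons j js ih =>
    simp only [List.foldl_cons]
    split_ifs
    · rw [ih, List.length_set]
    · exact ih ndp
    · exact ih ndp

theorem mg_inner_eq (grid : List (List Int)) (i mask : Nat) (c : Int) (js : List Nat)
    (ndp : List Int) (m : Nat) (hm : m < ndp.length) :
    (js.foldl (fun (ndp : List Int) j =>
      if mask &&& (1 <<< j) = 0 ∧ (grid.getD i []).getD j 0 = 1 then
        if mgDiagA i j mask then
          ndp.set (mask ||| (1 <<< j)) (ndp.getD (mask ||| (1 <<< j)) 0 + c)
        else ndp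
      else ndp) ndp).getD m 0
    = ndp.getD m 0
      + (js.map (fun j => if mgCond grid i mask j = true ∧ m = mask ||| (1 <<< j) then c else 0)).sum := by
  induction js generalizing ndp with
  | nil => simp
  | cons j js ih =>
    simp only [List.foldl_cons, List.map_cons, List.sum_cons]
    by_cases h1 : mask &&& (1 <<< j) = 0 ∧ (grid.getD i []).getD j 0 = 1
    · by_cases h2 : mgDiagA i j mask = true
      · rw [if_pos h1, if_pos h2, ih _ (by rw [List.length_set]; exact hm),
          mg_getD_set_add _ _ _ _ hm]
        have hc : mgCond grid i mask j = true := by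
          have h12 := h1.2
          simp only [List.getD_eq_getElem?_getD] at h12
          simp [mgCond, h1.1, h12, h2]
        simp [hc, add_assoc]
      · rw [if_pos h1, if_neg h2, ih _ hm]
        have hc : mgCond grid i mask j = false := by simp [mgCond, h2]
        simp [hc]
    · rw [if_neg h1, ih _ hm]
      have hc : mgCond grid i mask j = false := by
        simp only [mgCond, Bool.and_eq_false_iff, decide_eq_false_iff_not]
        tauto
      simp [hc]

theorem mg_outer_eq (grid : List (List Int)) (n i : Nat) (dp : List Int) (ms : List Nat)
    (ndp : List Int) (m : Nat) (hm : m < ndp.length) :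
    (ms.foldl (fun (ndp : List Int) mask =>
      if dp.getD mask 0 = 0 then ndp
      else (List.range n).foldl (fun (ndp : List Int) j =>
        if mask &&& (1 <<< j) = 0 ∧ (grid.getD i []).getD j 0 = 1 then
          if mgDiagA i j mask then
            ndp.set (mask ||| (1 <<< j)) (ndp.getD (mask ||| (1 <<< j)) 0 + dp.getD mask 0)
          else ndp
        else ndp) ndp) ndp).getD m 0
    = ndp.getD m 0
      + (ms.map (fun mask => ((List.range n).map (fun j =>
          if mgCond grid i mask j = true ∧ m = mask ||| (1 <<< j) then dp.getD mask 0 else 0)).sum)).sum := by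
  induction ms generalizing ndp with
  | nil => simp
  | cons mask ms ih =>
    simp only [List.foldl_cons, List.map_cons, List.sum_cons]
    by_cases h : dp.getD mask 0 = 0
    · rw [if_pos h, ih _ hm]
      have hz : ((List.range n).map (fun j =>
          if mgCond grid i mask j = true ∧ m = mask ||| (1 <<< j) then dp.getD mask 0 else 0)).sum
          = 0 := by
        rw [h]; simp
      rw [hz, zero_add]
    · rw [if_neg h, ih _ (by rw [mg_inner_len]; exact hm), mg_inner_eq _ _ _ _ _ _ _ hm,
        add_assoc]

def mgStep (grid : List (List Int)) (n : Nat) (dp : List Int) (i : Nat) : List Int :=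
  (List.range (2 ^ n)).foldl (fun (ndp : List Int) mask =>
    if dp.getD mask 0 = 0 then ndp
    else (List.range n).foldl (fun (ndp : List Int) j =>
      if mask &&& (1 <<< j) = 0 ∧ (grid.getD i []).getD j 0 = 1 then
        if mgDiagA i j mask then
          ndp.set (mask ||| (1 <<< j)) (ndp.getD (mask ||| (1 <<< j)) 0 + dp.getD mask 0)
        else ndp
      else ndp) ndp) ((List.replicate (2 ^ n) (0 : Int)) : List Int)

theorem mg_target_lt (n mask j : Nat) (hm : mask < 2 ^ n) (hj : j < n) :
    mask ||| (1 <<< j) < 2 ^ n :=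
  Nat.or_lt_two_pow hm (by rw [Nat.one_shiftLeft]; exact Nat.pow_lt_pow_right one_lt_two hj)

theorem mg_step_getD (grid : List (List Int)) (n : Nat) (dp : List Int) (i m : Nat)
    (hm : m < 2 ^ n) :
    (mgStep grid n dp i).getD m 0
    = ∑ mask ∈ Finset.range (2 ^ n), ∑ j ∈ Finset.range n,
        if mgCond grid i mask j = true ∧ m = mask ||| (1 <<< j) then dp.getD mask 0 else 0 := by
  unfold mgStep
  rw [mg_outer_eq _ _ _ _ _ _ _ (by rw [List.length_replicate]; exact hm),
    List.getD_replicate _ hm, mg_list_sum_range]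
  rw [zero_add]
  refine Finset.sum_congr rfl (fun mask _ => ?_)
  rw [mg_list_sum_range]

theorem mg_inv_step (grid : List (List Int)) (n i fuel : Nat) (dp : List Int) :
    ∑ m ∈ Finset.range (2 ^ n), (mgStep grid n dp i).getD m 0 * mgRecTo grid n fuel (i + 1) m
    = ∑ mask ∈ Finset.range (2 ^ n), dp.getD mask 0 * mgRecTo grid n (fuel + 1) i mask := by
  have h1 : ∀ m ∈ Finset.range (2 ^ n),
      (mgStep grid n dp i).getD m 0 * mgRecTo grid n fuel (i + 1) m
      = ∑ mask ∈ Finset.range (2 ^ n), ∑ j ∈ Finset.range n,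
          (if mgCond grid i mask j = true ∧ m = mask ||| (1 <<< j) then dp.getD mask 0 else 0)
            * mgRecTo grid n fuel (i + 1) m := by
    intro m hm
    rw [mg_step_getD _ _ _ _ _ (Finset.mem_range.mp hm), Finset.sum_mul]
    exact Finset.sum_congr rfl (fun mask _ => by rw [Finset.sum_mul])
  rw [Finset.sum_congr rfl h1, Finset.sum_comm]
  refine Finset.sum_congr rfl (fun mask hmask => ?_)
  rw [Finset.sum_comm]
  have h2 : ∀ j ∈ Finset.range n,
      (∑ m ∈ Finset.range (2 ^ n),
        (if mgCond grid i mask j = true ∧ m = mask ||| (1 <<< j) then dp.getD mask 0 else 0)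
          * mgRecTo grid n fuel (i + 1) m)
      = if mgCond grid i mask j = true then
          dp.getD mask 0 * mgRecTo grid n fuel (i + 1) (mask ||| (1 <<< j)) else 0 := by
    intro j hj
    by_cases hC : mgCond grid i mask j = true
    · rw [if_pos hC]
      have ht : mask ||| (1 <<< j) ∈ Finset.range (2 ^ n) :=
        Finset.mem_range.mpr
          (mg_target_lt n mask j (Finset.mem_range.mp hmask) (Finset.mem_range.mp hj))
      calc (∑ m ∈ Finset.range (2 ^ n),
              (if mgCond grid i mask j = true ∧ m = mask ||| (1 <<< j) then dp.getD mask 0 else 0)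
                * mgRecTo grid n fuel (i + 1) m)
          = ∑ m ∈ Finset.range (2 ^ n),
              (if m = mask ||| (1 <<< j) then
                dp.getD mask 0 * mgRecTo grid n fuel (i + 1) m else 0) := by
            refine Finset.sum_congr rfl (fun m _ => ?_)
            rw [ite_and, if_pos hC, ite_mul, zero_mul]
        _ = dp.getD mask 0 * mgRecTo grid n fuel (i + 1) (mask ||| (1 <<< j)) := by
            rw [Finset.sum_ite_eq' (Finset.range (2 ^ n)) (mask ||| (1 <<< j))
              (fun m => dp.getD mask 0 * mgRecTo grid n fuel (i + 1) m), if_pos ht]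
    · rw [if_neg hC]
      refine Finset.sum_eq_zero (fun m _ => ?_)
      rw [ite_and, if_neg hC, zero_mul]
  rw [Finset.sum_congr rfl h2]
  show _ = dp.getD mask 0 * mgRecTo grid n (fuel + 1) i mask
  rw [show mgRecTo grid n (fuel + 1) i mask
      = ∑ j ∈ Finset.range n, if mgCond grid i mask j = true
          then mgRecTo grid n fuel (i + 1) (mask ||| (1 <<< j)) else 0 from rfl,
    Finset.mul_sum]
  exact Finset.sum_congr rfl (fun j _ => by rw [mul_ite, mul_zero])

theorem mg_iter (grid : List (List Int)) (n : Nat) (dp0 : List Int) :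
    ∀ i, i ≤ n →
    ∑ m ∈ Finset.range (2 ^ n),
        ((List.range i).foldl (mgStep grid n) dp0).getD m 0 * mgRecTo grid n (n - i) i m
    = ∑ m ∈ Finset.range (2 ^ n), dp0.getD m 0 * mgRecTo grid n n 0 m := by
  intro i
  induction i with
  | zero => intro _; rw [Nat.sub_zero]; rfl
  | succ i ih =>
    intro h
    rw [List.range_succ, List.foldl_concat]
    have hfuel : n - i = (n - (i + 1)) + 1 := by omega
    rw [mg_inv_step grid n i (n - (i + 1)) _, ← hfuel]
    exact ih (Nat.le_of_succ_le h)

theorem mg_dp0_sum (grid : List (List Int)) (n : Nat) :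
    ∑ m ∈ Finset.range (2 ^ n),
      ((List.replicate (2 ^ n) (0 : Int)).set 0 1).getD m 0 * mgRecTo grid n n 0 m
    = mgRecTo grid n n 0 0 := by
  have hget : ∀ m, m < 2 ^ n →
      ((List.replicate (2 ^ n) (0 : Int)).set 0 1).getD m 0 = if m = 0 then 1 else 0 := by
    intro m hm
    by_cases h : m = 0
    · subst h
      simp [List.getD_eq_getElem?_getD, hm]
    · have h0 : ¬ (0 = m) := fun e => h e.symm
      simp [List.getD_eq_getElem?_getD, h0, h]
  calc ∑ m ∈ Finset.range (2 ^ n),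
        ((List.replicate (2 ^ n) (0 : Int)).set 0 1).getD m 0 * mgRecTo grid n n 0 m
      = ∑ m ∈ Finset.range (2 ^ n), (if m = 0 then mgRecTo grid n n 0 m else 0) := by
        refine Finset.sum_congr rfl (fun m hm => ?_)
        rw [hget m (Finset.mem_range.mp hm), ite_mul, one_mul, zero_mul]
    _ = mgRecTo grid n n 0 0 := by
        rw [Finset.sum_ite_eq' (Finset.range (2 ^ n)) 0 (fun m => mgRecTo grid n n 0 m),
          if_pos (Finset.mem_range.mpr (Nat.two_pow_pos n))]

theorem mg_final (grid : List (List Int)) (n : Nat) (dp : List Int) :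
    dp.getD (2 ^ n - 1) 0
    = ∑ m ∈ Finset.range (2 ^ n), dp.getD m 0 * mgRecTo grid n 0 n m := by
  calc dp.getD (2 ^ n - 1) 0
      = ∑ m ∈ Finset.range (2 ^ n), (if m = 2 ^ n - 1 then dp.getD m 0 else 0) := by
        rw [Finset.sum_ite_eq' (Finset.range (2 ^ n)) (2 ^ n - 1) (fun m => dp.getD m 0),
          if_pos (Finset.mem_range.mpr (Nat.sub_lt (Nat.two_pow_pos n) one_pos))]
    _ = ∑ m ∈ Finset.range (2 ^ n), dp.getD m 0 * mgRecTo grid n 0 n m := by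
        refine Finset.sum_congr rfl (fun m _ => ?_)
        rw [show mgRecTo grid n 0 n m = if m = 2 ^ n - 1 then 1 else 0 from rfl,
          mul_ite, mul_one, mul_zero]

theorem mg_cnt_or (n mask j : Nat) (hj : j < n) (hb : mask.testBit j = false) :
    mgCnt n (mask ||| (1 <<< j)) = mgCnt n mask + 1 := by
  unfold mgCnt
  have hfe : (Finset.range n).filter (fun k => (mask ||| (1 <<< j)).testBit k)
      = ((Finset.range n).filter (fun k => mask.testBit k)) ∪
        ((Finset.range n).filter (fun k => k = j)) := by
    rw [← Finset.filter_or]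
    refine Finset.filter_congr (fun k _ => ?_)
    rw [Nat.one_shiftLeft, Nat.testBit_or, Nat.testBit_two_pow]
    cases h : mask.testBit k
    · simp [eq_comm]
    · simp
  rw [hfe, Finset.filter_eq', if_pos (Finset.mem_range.mpr hj),
    Finset.card_union_of_disjoint (by
      rw [Finset.disjoint_singleton_right, Finset.mem_filter]
      exact fun hmem => by rw [hb] at hmem; exact absurd hmem.2 (by simp)),
    Finset.card_singleton]

theorem mg_full (n mask : Nat) (hlt : mask < 2 ^ n) (hc : mgCnt n mask = n) :
    mask = 2 ^ n - 1 := by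
  have heq : (Finset.range n).filter (fun k => mask.testBit k) = Finset.range n := by
    refine Finset.eq_of_subset_of_card_le (Finset.filter_subset _ _) ?_
    rw [Finset.card_range]
    exact le_of_eq hc.symm
  apply Nat.eq_of_testBit_eq
  intro k
  rw [Nat.testBit_two_pow_sub_one]
  by_cases hk : k < n
  · have hmem : k ∈ (Finset.range n).filter (fun k => mask.testBit k) := by
      rw [heq]; exact Finset.mem_range.mpr hk
    rw [(Finset.mem_filter.mp hmem).2, decide_eq_true hk]
  · rw [Nat.testBit_lt_two_pow
      (lt_of_lt_of_le hlt (Nat.pow_le_pow_right (by norm_num) (Nat.le_of_not_lt hk)))]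
    simp [hk]

theorem mg_cnt_zero (n : Nat) : mgCnt n 0 = 0 := by
  unfold mgCnt
  rw [Finset.card_eq_zero, Finset.filter_eq_empty_iff]
  intro k _
  simp [Nat.zero_testBit]

theorem mg_foldl_sum (js : List Nat) (P : Nat → Prop) [DecidablePred P] (q : Nat → Bool)
    (f : Nat → Int) (a : Int) :
    (js.foldl (fun (total : Int) j =>
      if P j then (if q j then total + f j else total) else total) a)
    = a + (js.map (fun j => if P j ∧ q j = true then f j else 0)).sum := by
  induction js generalizing a with
  | nil => simp
  | cons j js ih =>
    simp only [List.foldl_cons, List.map_cons, List.sum_cons]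
    by_cases h1 : P j
    · by_cases h2 : q j = true
      · rw [if_pos h1, if_pos h2, ih, if_pos ⟨h1, h2⟩, add_assoc]
      · rw [if_pos h1, if_neg h2, ih, if_neg (fun h => h2 h.2), zero_add]
    · rw [if_neg h1, ih, if_neg (fun h => h1 h.1), zero_add]

theorem mg_bridge (grid : List (List Int)) (n : Nat) :
    ∀ fuel i mask, fuel ≤ n → mask < 2 ^ n → mgCnt n mask = n - fuel →
    mgRecTo grid n fuel i mask = mgRec grid n fuel i mask := by
  intro fuel
  induction fuel with
  | zero =>
    intro i mask _ hlt hc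
    rw [show mgRec grid n 0 i mask = 1 from rfl,
      show mgRecTo grid n 0 i mask = if mask = 2 ^ n - 1 then 1 else 0 from rfl,
      if_pos (mg_full n mask hlt (by rw [hc, Nat.sub_zero]))]
  | succ fuel ih =>
    intro i mask hfn hlt hc
    rw [show mgRec grid n (fuel + 1) i mask
        = (List.range n).foldl (fun (total : Int) j =>
            if (mask >>> j) &&& 1 = 0 ∧ (grid.getD i []).getD j 0 = 1 then
              if mgDiagB i j mask then total + mgRec grid n fuel (i + 1) (mask ||| (1 <<< j))
              else total
            else total) 0 from rfl,
      mg_foldl_sum, zero_add, mg_list_sum_range,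
      show mgRecTo grid n (fuel + 1) i mask
        = ∑ j ∈ Finset.range n, if mgCond grid i mask j = true
            then mgRecTo grid n fuel (i + 1) (mask ||| (1 <<< j)) else 0 from rfl]
    refine Finset.sum_congr rfl (fun j hj => ?_)
    have hjn := Finset.mem_range.mp hj
    have hcond : (mgCond grid i mask j = true)
        ↔ (((mask >>> j) &&& 1 = 0 ∧ (grid.getD i []).getD j 0 = 1)
            ∧ mgDiagB i j mask = true) := by
      rw [mgDiagB_eq]
      simp only [mgCond, Bool.and_eq_true, decide_eq_true_eq, mg_shift_and_one,
        mg_and_pow_eq_zero, and_assoc]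
    by_cases hC : mgCond grid i mask j = true
    · obtain ⟨⟨hb, hg⟩, hd⟩ := hcond.mp hC
      rw [if_pos hC, if_pos (hcond.mp hC),
        ih (i + 1) (mask ||| (1 <<< j)) (Nat.le_of_succ_le hfn)
          (mg_target_lt n mask j hlt hjn)
          (by rw [mg_cnt_or n mask j hjn ((mg_shift_and_one mask j).mp hb), hc]; omega)]
    · rw [if_neg hC, if_neg (fun hB => hC (hcond.mpr hB))]

-- ===== VERDICT (by name: the statement is the Claim_ definition above) =====
theorem monster_game_spec : Claim_equal_monster_game := by
  intro grid _ _
  show monster_game grid = monster_game_alt grid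
  unfold monster_game monster_game_alt
  show ((List.range grid.length).foldl (mgStep grid grid.length)
      ((List.replicate (2 ^ grid.length) (0 : Int)).set 0 1)).getD (2 ^ grid.length - 1) 0
    = mgRec grid grid.length grid.length 0 0
  rw [mg_final grid grid.length]
  have hiter := mg_iter grid grid.length
    ((List.replicate (2 ^ grid.length) (0 : Int)).set 0 1) grid.length le_rfl
  rw [Nat.sub_self] at hiter
  rw [hiter, mg_dp0_sum]
  exact mg_bridge grid grid.length grid.length 0 0 le_rfl (Nat.two_pow_pos grid.length)
    (by rw [mg_cnt_zero, Nat.sub_self])
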